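-- pv_equiv track=rewrite | github.com/DSW41923/AoC_DSW41923 | 2023/Day_13.py | get_column_reflection
-- ===== SOURCE A (Python) =====
-- def get_column_reflection(pattern):
--     column_range = len(pattern[0])
--     for c in range(column_range-1):
--         reflecting_column = (c, c+1)
--         while 0 <= reflecting_column[0] and reflecting_column[1] < column_range:
--             if [p[reflecting_column[0]] for p in pattern] == [p[reflecting_column[1]] for p in pattern]:
--                 reflecting_column = (reflecting_column[0]-1, reflecting_column[1]+1)
--             else:
--                 reflecting_column = (column_range, column_range)
--         if reflecting_column != (column_range, column_range):
--             return c
--     return -1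
-- ===== SOURCE B (Python) =====
-- def _mirrors(row, c, n):
--     # row discards a mirror split at c iff its reversed left part does not equal its right part
--     w = min(c + 1, n - 1 - c)
--     return row[c + 1 - w:c + 1] == row[c + 1:c + 1 + w][::-1]
--
--
-- def get_column_reflection(pattern):
--     n = len(pattern[0])
--     candidates = list(range(n - 1))
--     for row in pattern:
--         candidates = [c for c in candidates if _mirrors(row, c, n)]
--         if not candidates:
--             return -1
--     return candidates[0]
-- ===== Notes on version B (the rewrite author's own statement) =====
-- stated objective: alternative
-- what changed: B inverts the traversal: instead of A's per-split outward expansion that extracts whole columns across all rows, B walks the rows once, keeping a shrinking list of candidate split positions and pruning each row's candidates by a direct reversed-slice comparison on that row, with early exit when no candidate survives.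
-- outside the precondition, e.g. on get_column_reflection(['aab', 'aa']): A returns 0, B returns 0
import Mathlib
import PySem

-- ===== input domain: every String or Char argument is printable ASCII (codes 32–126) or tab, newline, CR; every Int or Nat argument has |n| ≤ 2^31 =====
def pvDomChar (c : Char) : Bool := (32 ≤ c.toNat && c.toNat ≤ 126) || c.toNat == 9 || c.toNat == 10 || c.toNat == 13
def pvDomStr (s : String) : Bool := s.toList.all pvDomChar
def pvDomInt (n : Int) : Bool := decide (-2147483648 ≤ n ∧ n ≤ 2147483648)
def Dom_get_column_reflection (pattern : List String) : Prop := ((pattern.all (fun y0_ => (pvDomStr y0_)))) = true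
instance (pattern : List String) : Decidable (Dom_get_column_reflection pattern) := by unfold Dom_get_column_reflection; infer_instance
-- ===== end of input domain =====

-- B replaces A's per-split outward column expansion by a single walk over the rows that
-- prunes a shrinking list of candidate split positions with a reversed-slice test per row
-- (alternative decomposition; same worst-case cost, early exit when no candidate survives).

-- ===== PORT A =====
-- [p[i] for p in pattern]  (the .getD ' ' only fires where Python would raise IndexError, outside Pre_)
def gcrCol (pattern : List String) (i : Int) : List Char :=
  pattern.map (fun p => (PySem.Str.pyGet? p i).getD ' ')

-- the while-loop on the pair reflecting_column = (a, b)
def gcrLoop (pattern : List String) (n : Int) (a b : Int) : Int × Int :=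
  if h : 0 ≤ a ∧ b < n then
    if gcrCol pattern a = gcrCol pattern b then
      gcrLoop pattern n (a - 1) (b + 1)
    else
      gcrLoop pattern n n n
  else (a, b)
termination_by (n + 1 - b).toNat
decreasing_by
  · omega
  · omega

-- the for-loop over c in range(column_range-1), with early return
def gcrOuter (pattern : List String) (n : Int) : List Int → Int
  | [] => -1
  | c :: rest =>
      if gcrLoop pattern n c (c + 1) ≠ (n, n) then c else gcrOuter pattern n rest

def get_column_reflection (pattern : List String) : Int :=
  let n : Int := ((pattern.headD "").toList.length : Int)   -- len(pattern[0]); [] excluded by Pre_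
  gcrOuter pattern n (PySem.List.pyRange 0 (n - 1) 1)

-- ===== PORT B =====
-- _mirrors(row, c, n): row[c+1-w:c+1] == row[c+1:c+1+w][::-1] with w = min(c+1, n-1-c).
-- All slice bounds are nonnegative here, so the Python slices are exactly drop/take.
def gcrRowMirror (row : List Char) (c n : Nat) : Bool :=
  let w := min (c + 1) (n - 1 - c)
  (row.drop (c + 1 - w)).take w = ((row.drop (c + 1)).take w).reverse

-- first surviving candidate; Python's final `candidates[0]` is only reached with a
-- nonempty list (otherwise the loop returned -1), so the [] arm is unreachable under Pre_
def gcrFirst (l : List Nat) : Int :=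
  match l with
  | [] => -1
  | c :: _ => (c : Int)

-- the for-loop over the rows, pruning the candidate list, with early return -1
def gcrRows (n : Nat) : List (List Char) → List Nat → Int
  | [], cands => gcrFirst cands
  | row :: rest, cands =>
      let cands' := cands.filter (fun c => gcrRowMirror row c n)
      if cands'.isEmpty then -1 else gcrRows n rest cands'

def get_column_reflection_alt (pattern : List String) : Int :=
  let n := (pattern.headD "").toList.length
  gcrRows n (pattern.map String.toList) (List.range (n - 1))

-- ===== PRECONDITION & SPEC =====
-- Pre_ excludes the empty pattern (pattern[0] raises IndexError) and ragged patterns with at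
-- least two columns in which some row is shorter than the first row, on which A's column
-- indexing may raise IndexError depending on how far the reflection scan reaches.
def Pre_get_column_reflection (pattern : List String) : Prop :=
  pattern ≠ [] ∧ ((pattern.headD "").toList.length ≤ 1 ∨
    ∀ s ∈ pattern, (pattern.headD "").toList.length ≤ s.toList.length)
instance (pattern : List String) : Decidable (Pre_get_column_reflection pattern) := by
  unfold Pre_get_column_reflection; infer_instance
def pvWitness_get_column_reflection : List String := ["#.##.", "#.##.", "..#.#"]

def Spec_get_column_reflection (pattern : List String) (out : Int) : Prop := out = get_column_reflection_alt pattern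
instance (pattern : List String) (out : Int) : Decidable (Spec_get_column_reflection pattern out) := by unfold Spec_get_column_reflection; infer_instance

-- ===== CLAIM (what is proved, stated in full; the proofs are below) =====
def Claim_equal_get_column_reflection : Prop := ∀ (pattern : List String), Dom_get_column_reflection pattern → Pre_get_column_reflection pattern → Spec_get_column_reflection pattern (get_column_reflection pattern)

-- ===== LEMMAS AND PROOFS =====

-- the per-index column, in Nat form
def gcrColN (pattern : List String) (j : Nat) : List Char :=
  pattern.map (fun p => p.toList.getD j ' ')

lemma gcrCol_natCast (pattern : List String) (j : Nat) :
    gcrCol pattern (j : Int) = gcrColN pattern j := by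
  unfold gcrCol gcrColN
  refine List.map_congr_left (fun p _ => ?_)
  simp [List.getD]

lemma gcrLoop_sentinel (pattern : List String) (n : Int) :
    gcrLoop pattern n n n = (n, n) := by
  rw [gcrLoop, dif_neg]; omega

-- characterisation of the while-loop: it ends in the sentinel (n,n) iff some in-range pair mismatches
lemma gcrLoop_char (pattern : List String) (n : Int) (_hn : 0 ≤ n) :
    ∀ (k : Nat) (a b : Int), (n - b).toNat = k → a < b → b ≤ n →
    (gcrLoop pattern n a b = (n, n) ↔
      ∃ i : Nat, 0 ≤ a - i ∧ b + i < n ∧ gcrCol pattern (a - i) ≠ gcrCol pattern (b + i)) := by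
  intro k
  induction k using Nat.strong_induction_on with
  | _ k ih =>
    intro a b hk hab hbn
    by_cases h : 0 ≤ a ∧ b < n
    · rw [gcrLoop, dif_pos h]
      by_cases hc : gcrCol pattern a = gcrCol pattern b
      · rw [if_pos hc]
        have hrec := ih ((n - (b + 1)).toNat) (by omega) (a - 1) (b + 1) rfl (by omega) (by omega)
        rw [hrec]
        constructor
        · rintro ⟨i, h1, h2, h3⟩
          exact ⟨i + 1, by push_cast; omega, by push_cast; omega,
            by convert h3 using 2 <;> push_cast <;> ring⟩
        · rintro ⟨i, h1, h2, h3⟩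
          cases i with
          | zero => simp at h1 h2 h3; exact absurd hc (by simpa using h3)
          | succ i =>
            exact ⟨i, by omega, by omega,
              by convert h3 using 2 <;> push_cast <;> ring⟩
      · rw [if_neg hc, gcrLoop_sentinel]
        constructor
        · intro _; exact ⟨0, by simpa using h.1, by simpa using h.2, by simpa using hc⟩
        · intro _; rfl
    · rw [gcrLoop, dif_neg h]
      constructor
      · intro heq
        have ha : a = n := congrArg Prod.fst heq
        have hb : b = n := congrArg Prod.snd heq
        omega
      · rintro ⟨i, h1, h2, _⟩
        exfalso; omega

-- the row test, read off the indices
lemma gcrRowMirror_iff (row : List Char) (c n : Nat) (hlen : n ≤ row.length) (hc : c + 1 < n) :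
    gcrRowMirror row c n = true ↔
      ∀ k : Nat, k ≤ c → c + 1 + k < n → row.getD (c - k) ' ' = row.getD (c + 1 + k) ' ' := by
  unfold gcrRowMirror
  set w := min (c + 1) (n - 1 - c) with hw
  have hwc : w ≤ c + 1 := by omega
  have hwn : c + 1 + w ≤ n := by omega
  have hl1 : ((row.drop (c + 1 - w)).take w).length = w := by
    simp only [List.length_take, List.length_drop]; omega
  have hl2 : (((row.drop (c + 1)).take w).reverse).length = w := by
    simp only [List.length_reverse, List.length_take, List.length_drop]; omega
  constructor
  · intro heq k hk1 hk2
    have hkw : k < w := by omega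
    have := congrArg (fun l => l.getD (w - 1 - k) ' ') (of_decide_eq_true heq)
    simp only at this
    rw [List.getD_eq_getElem _ _ (by omega : w - 1 - k < _),
        List.getD_eq_getElem _ _ (by rw [hl2]; omega)] at this
    rw [List.getElem_take, List.getElem_drop] at this
    rw [List.getElem_reverse] at this
    rw [List.getElem_take, List.getElem_drop] at this
    rw [List.getD_eq_getElem _ _ (by omega : c - k < row.length),
        List.getD_eq_getElem _ _ (by omega : c + 1 + k < row.length)]
    have e1 : c + 1 - w + (w - 1 - k) = c - k := by omega
    have e2 : c + 1 + (((row.drop (c + 1)).take w).length - 1 - (w - 1 - k)) = c + 1 + k := by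
      simp only [List.length_take, List.length_drop]; omega
    simp only [e1, e2] at this
    exact this
  · intro hfor
    apply decide_eq_true
    apply List.ext_getElem (by rw [hl1, hl2])
    intro j hj1 hj2
    have hjw : j < w := by rwa [hl1] at hj1
    rw [List.getElem_take, List.getElem_drop]
    rw [List.getElem_reverse, List.getElem_take, List.getElem_drop]
    have hk := hfor (w - 1 - j) (by omega) (by omega)
    rw [List.getD_eq_getElem _ _ (by omega : c - (w - 1 - j) < row.length),
        List.getD_eq_getElem _ _ (by omega : c + 1 + (w - 1 - j) < row.length)] at hk
    have e1 : c + 1 - w + j = c - (w - 1 - j) := by omega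
    have e2 : c + 1 + (((row.drop (c + 1)).take w).length - 1 - j) = c + 1 + (w - 1 - j) := by
      simp only [List.length_take, List.length_drop]; omega
    simp only [e1, e2]
    exact hk

-- the row loop computes: first candidate surviving every row's filter, else -1
lemma gcrRows_eq (n : Nat) (rows : List (List Char)) :
    ∀ cands : List Nat,
      gcrRows n rows cands
        = gcrFirst (cands.filter (fun c => rows.all (fun row => gcrRowMirror row c n))) := by
  induction rows with
  | nil => intro cands; simp [gcrRows, List.all_nil, List.filter_true]
  | cons row rest ih =>
    intro cands
    simp only [gcrRows]
    by_cases he : (cands.filter (fun c => gcrRowMirror row c n)).isEmpty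
    · rw [if_pos he]
      have hnone : ∀ c ∈ cands, ¬ gcrRowMirror row c n = true := by
        rw [← List.filter_eq_nil_iff]; exact List.isEmpty_iff.mp he
      have : cands.filter (fun c => (row :: rest).all (fun r => gcrRowMirror r c n)) = [] := by
        rw [List.filter_eq_nil_iff]
        intro c hc
        simp only [List.all_cons, Bool.and_eq_true, not_and]
        intro hr
        exact absurd hr (hnone c hc)
      rw [this]; rfl
    · rw [if_neg he, ih]
      congr 1
      rw [List.filter_filter]
      apply List.filter_congr
      intro c _
      simp [List.all_cons, Bool.and_comm]
-- A's candidate test equals B's, per candidate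
lemma gcr_key (pattern : List String) (N : Nat)
    (hall : ∀ s ∈ pattern, N ≤ s.toList.length) (c : Nat) (hc : c + 1 < N) :
    (gcrLoop pattern (N : Int) (c : Int) ((c : Int) + 1) ≠ ((N : Int), (N : Int))) ↔
      (pattern.map String.toList).all (fun row => gcrRowMirror row c N) = true := by
  have hloop := gcrLoop_char pattern (N : Int) (by exact_mod_cast N.zero_le)
    (((N : Int) - ((c : Int) + 1)).toNat) (c : Int) ((c : Int) + 1) rfl (by omega) (by omega)
  rw [ne_eq, hloop]
  push Not
  rw [List.all_eq_true]
  constructor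
  · intro h row hrow
    obtain ⟨p, hp, rfl⟩ := List.mem_map.mp hrow
    rw [gcrRowMirror_iff _ _ _ (hall p hp) hc]
    intro k hk1 hk2
    have := h k (by omega) (by omega)
    have e1 : (c : Int) - (k : Int) = ((c - k : Nat) : Int) := by omega
    have e2 : (c : Int) + 1 + (k : Int) = ((c + 1 + k : Nat) : Int) := by push_cast; ring
    rw [e1, e2, gcrCol_natCast, gcrCol_natCast] at this
    simp only [gcrColN] at this
    exact (List.map_inj_left.mp this) p hp
  · intro h i h1 h2
    have hk1 : i ≤ c := by omega
    have hk2 : c + 1 + i < N := by omega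
    have e1 : (c : Int) - (i : Int) = ((c - i : Nat) : Int) := by omega
    have e2 : (c : Int) + 1 + (i : Int) = ((c + 1 + i : Nat) : Int) := by push_cast; ring
    rw [e1, e2, gcrCol_natCast, gcrCol_natCast]
    simp only [gcrColN]
    apply List.map_inj_left.mpr
    intro p hp
    have hm := h p.toList (List.mem_map.mpr ⟨p, hp, rfl⟩)
    exact (gcrRowMirror_iff _ _ _ (hall p hp) hc).mp hm i hk1 hk2

-- A's outer scan equals "first filtered candidate"
lemma gcr_outer (pattern : List String) (N : Nat)
    (hall : ∀ s ∈ pattern, N ≤ s.toList.length) :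
    ∀ l : List Nat, (∀ c ∈ l, c + 1 < N) →
      gcrOuter pattern (N : Int) (l.map (fun (k : Nat) => (0 : Int) + (k : Int)))
        = gcrFirst (l.filter (fun c => (pattern.map String.toList).all (fun row => gcrRowMirror row c N))) := by
  intro l
  induction l with
  | nil => intro _; rfl
  | cons c rest ih =>
    intro hl
    have hc : c + 1 < N := hl c (by simp)
    simp only [List.map_cons, gcrOuter, zero_add, List.filter_cons]
    have hkey := gcr_key pattern N hall c hc
    by_cases hm : (pattern.map String.toList).all (fun row => gcrRowMirror row c N) = true
    · rw [if_pos (hkey.mpr hm), hm]; rfl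
    · rw [if_neg (fun hne => hm (hkey.mp hne)), eq_false_of_ne_true hm]
      simp only [Bool.false_eq_true, if_false]
      simpa using ih (fun c' hc' => hl c' (by simp [hc']))

lemma gcr_main (pattern : List String)
    (hall : ∀ s ∈ pattern, (pattern.headD "").toList.length ≤ s.toList.length) :
    get_column_reflection pattern = get_column_reflection_alt pattern := by
  simp only [get_column_reflection, get_column_reflection_alt]
  set N := (pattern.headD "").toList.length with hNdef
  have hrange : PySem.List.pyRange 0 ((N : Int) - 1) 1
      = (List.range (N - 1)).map (fun (k : Nat) => (0 : Int) + (k : Int)) := by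
    rw [PySem.List.pyRange_one]
    rw [show ((((N : Int) - 1) - 0).toNat) = N - 1 from by omega]
  rw [hrange, gcrRows_eq]
  exact gcr_outer pattern N hall (List.range (N - 1))
    (fun c hc => by have := List.mem_range.mp hc; omega)

-- with at most one column there is no candidate split: both sides see an empty range
lemma gcr_small (pattern : List String)
    (h1 : (pattern.headD "").toList.length ≤ 1) :
    get_column_reflection pattern = get_column_reflection_alt pattern := by
  simp only [get_column_reflection, get_column_reflection_alt]
  rw [PySem.List.pyRange_one_eq_nil (by omega)]
  rw [show (pattern.headD "").toList.length - 1 = 0 from by omega]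
  rw [gcrRows_eq]
  simp [gcrOuter, List.filter_nil, gcrFirst]

-- ===== VERDICT (by name: the statement is the Claim_ definition above) =====
theorem get_column_reflection_spec : Claim_equal_get_column_reflection := by
  intro pattern _ hpre
  unfold Spec_get_column_reflection
  obtain ⟨hne, hcase⟩ := hpre
  cases hcase with
  | inl h1 => exact gcr_small pattern h1
  | inr hall => exact gcr_main pattern hall
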